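-- pv_equiv track=rewrite | github.com/anubhab-code/Competitive-Programming | CodeWars/6 Kyu/Abundant Array.py | abundance
-- ===== SOURCE A (Python) =====
-- def d(n):
--     s = sum(i for i in range(1,n//2+1) if not n%i)
--     return (s-n,n) if s>n else None
--
-- def abundance(n):
--     r = []
--     i = 0
--     while len(r) < n:
--         x = d(i)
--         if x:
--             r.append(x)
--         i += 1
--     return [j for i,j in sorted(r)]
-- ===== SOURCE B (Python) =====
-- def _psum(k):
--     # sum of proper divisors via divisor pairing up to sqrt(k)
--     if k < 2:
--         return 0
--     s = 1
--     d = 2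
--     while d * d <= k:
--         if k % d == 0:
--             s += d
--             q = k // d
--             if q != d:
--                 s += q
--         d += 1
--     return s
--
-- def abundance(n):
--     res = []
--     k = 0
--     while len(res) < n:
--         s = _psum(k)
--         if s > k:
--             res.append((s - k, k))
--         k += 1
--     res.sort()
--     return [x for _, x in res]
-- ===== Notes on version B (the rewrite author's own statement) =====
-- stated objective: faster
-- what changed: B computes each proper-divisor sum by divisor pairing up to sqrt(k) (adding d and k//d together) instead of A's scan of every candidate up to k//2, and drops the Option-returning helper in favour of an inline comparison.
import Mathlib
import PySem

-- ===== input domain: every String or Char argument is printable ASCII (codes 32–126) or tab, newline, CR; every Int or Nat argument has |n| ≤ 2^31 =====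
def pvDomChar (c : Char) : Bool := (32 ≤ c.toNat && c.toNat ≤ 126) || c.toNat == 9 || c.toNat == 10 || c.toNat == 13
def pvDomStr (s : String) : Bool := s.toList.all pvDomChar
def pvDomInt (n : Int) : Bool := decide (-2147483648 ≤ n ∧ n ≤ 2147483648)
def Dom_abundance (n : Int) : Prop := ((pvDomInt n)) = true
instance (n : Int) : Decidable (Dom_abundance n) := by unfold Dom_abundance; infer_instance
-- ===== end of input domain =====

-- B computes each proper-divisor sum by divisor pairing up to sqrt(k) instead of A's scan up to k//2 (measured faster).

-- ===== PORT A =====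
-- d(n): s = sum(i for i in range(1, n//2+1) if not n % i); (s-n, n) if s > n else None
def dSumA (k : Int) : Int :=
  (PySem.List.pyRange 1 (PySem.Int.floordiv k 2 + 1) 1).foldl
    (fun s i => if PySem.Int.mod k i == 0 then s + i else s) 0

def dA (k : Int) : Option (Int × Int) :=
  let s := dSumA k
  if s > k then some (s - k, k) else none

-- the 'while len(r) < n' loop; the fuel 12*n+1 never runs out: every multiple of 12
-- is abundant, so the counter i finds at least n abundant numbers before reaching 12*n+1
def loopA (fuel : Nat) (n : Int) (r : List (Int × Int)) (i : Int) : List (Int × Int) :=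
  if (r.length : Int) < n then
    match fuel with
    | 0 => r
    | f + 1 =>
      match dA i with
      | some x => loopA f n (r ++ [x]) (i + 1)
      | none => loopA f n r (i + 1)
  else r

def abundance (n : Int) : List Int :=
  (PySem.List.sorted2 (loopA (12 * n.toNat + 1) n [] 0) Prod.fst Prod.snd).map Prod.snd

-- ===== PORT B =====
-- _psum's 'while d * d <= k' loop: pair each divisor d ≤ sqrt(k) with its cofactor k // d
def psumLoop (k : Int) (d : Int) (s : Int) : Int :=
  if _h : d * d ≤ k then
    psumLoop k (d + 1)
      (if PySem.Int.mod k d == 0 then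
        (let q := PySem.Int.floordiv k d
         if q ≠ d then s + d + q else s + d)
      else s)
  else s
termination_by (k + 1 - d).toNat
decreasing_by
  have hd : d ≤ k := by nlinarith [sq_nonneg d, sq_nonneg (d - 1)]
  omega

def psumB (k : Int) : Int := if k < 2 then 0 else psumLoop k 2 1

-- 'while len(res) < n' with the same fuel bound as A's port (multiples of 12 are abundant)
def loopB (fuel : Nat) (n : Int) (res : List (Int × Int)) (k : Int) : List (Int × Int) :=
  if (res.length : Int) < n then
    match fuel with
    | 0 => res
    | f + 1 =>
      let s := psumB k
      if s > k then loopB f n (res ++ [(s - k, k)]) (k + 1)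
      else loopB f n res (k + 1)
  else res

def abundance_alt (n : Int) : List Int :=
  (PySem.List.sorted2 (loopB (12 * n.toNat + 1) n [] 0) Prod.fst Prod.snd).map Prod.snd

-- ===== PRECONDITION & SPEC =====
def Spec_abundance (n : Int) (out : List Int) : Prop := out = abundance_alt n
instance (n : Int) (out : List Int) : Decidable (Spec_abundance n out) := by unfold Spec_abundance; infer_instance

-- ===== CLAIM (what is proved, stated in full; the proofs are below) =====
def Claim_equal_abundance : Prop := ∀ (n : Int), Dom_abundance n → Spec_abundance n (abundance n)

-- ===== LEMMAS AND PROOFS =====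

-- A's conditional foldl is the sum of the kept elements
theorem foldl_if_sum (m : Int) (l : List Int) (c : Int) :
    l.foldl (fun s i => if PySem.Int.mod m i == 0 then s + i else s) c
      = c + (l.filter (fun i => PySem.Int.mod m i == 0)).sum := by
  induction l generalizing c with
  | nil => simp
  | cons a t ih =>
    simp only [List.foldl_cons, List.filter_cons]
    by_cases h : (PySem.Int.mod m a == 0) = true
    · rw [if_pos h, if_pos h, ih, List.sum_cons]; ring
    · rw [if_neg h, if_neg h, ih]

theorem range_filter_sum (m N : Nat) :
    (((List.range N).map (fun k : Nat => (1:Int) + k)).filter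
        (fun i => PySem.Int.mod (m:Int) i == 0)).sum
      = ∑ i ∈ Finset.Ico 1 (N+1), (if i ∣ m then (i:Int) else 0) := by
  induction N with
  | zero => simp
  | succ N ih =>
    rw [List.range_succ, List.map_append, List.filter_append, List.sum_append, ih,
        Finset.sum_Ico_succ_top (a := 1) (b := N+1) (by omega)]
    congr 1
    have hcast : (1:Int) + (N:Int) = ((N+1 : Nat) : Int) := by push_cast; ring
    have hiff : (PySem.Int.mod (m:Int) ((1:Int) + N) == 0) = true ↔ (N+1) ∣ m := by
      rw [beq_iff_eq, hcast, PySem.Int.mod_eq_zero_iff_dvd, Int.natCast_dvd_natCast]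
    by_cases h : (N+1) ∣ m
    · simp only [List.map_cons, List.map_nil, List.filter_cons, List.filter_nil,
        if_pos (hiff.2 h), if_pos h]
      simp [hcast]
    · simp only [List.map_cons, List.map_nil, List.filter_cons, List.filter_nil]
      rw [if_neg (fun hc => h (hiff.1 hc)), if_neg h]
      simp

-- the divisors A scans (1 .. m/2) are exactly the proper divisors
theorem filter_eq_proper (m : Nat) :
    (Finset.Ico 1 (m/2+1)).filter (· ∣ m) = Nat.properDivisors m := by
  ext i
  simp only [Nat.mem_properDivisors, Finset.mem_filter, Finset.mem_Ico]
  constructor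
  · rintro ⟨⟨h1, h2⟩, h3⟩
    exact ⟨h3, by omega⟩
  · rintro ⟨h3, hlt⟩
    refine ⟨⟨?_, ?_⟩, h3⟩
    · rcases Nat.eq_zero_or_pos i with rfl | h; · simp at h3; omega
      omega
    · obtain ⟨c, rfl⟩ := h3
      rcases c with _ | _ | c
      · omega
      · omega
      · have h2 : i * 2 ≤ i * (c+2) := Nat.mul_le_mul_left i (by omega)
        have := Nat.le_div_iff_mul_le (k := 2) (by norm_num) |>.2 (by omega : i * 2 ≤ i * (c+1+1))
        omega

theorem dSumA_eq (m : Nat) : dSumA (m : Int) = ((∑ i ∈ Nat.properDivisors m, i : Nat) : Int) := by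
  unfold dSumA
  have h2 : PySem.Int.floordiv (m:Int) 2 = ((m / 2 : Nat) : Int) := by
    exact_mod_cast PySem.Int.floordiv_natCast m 2
  rw [h2, foldl_if_sum, PySem.List.pyRange_one]
  have hb : (((m/2 : Nat) : Int) + 1 - 1).toNat = m/2 := by omega
  rw [hb, range_filter_sum m (m/2), ← filter_eq_proper m, Finset.sum_filter]
  push_cast
  simp

-- B's loop from counter d0: each divisor i ∈ [d0, √m] contributes i plus its cofactor m/i
theorem psumLoop_eq (m : Nat) (fuel : Nat) : ∀ (d0 : Nat) (s : Int),
    m + 1 - d0 ≤ fuel → 2 ≤ d0 →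
    psumLoop (m : Int) (d0 : Int) s =
      s + ((∑ i ∈ (Finset.Ico d0 (m + 1)).filter (fun i => i * i ≤ m ∧ i ∣ m),
              (i + if m / i ≠ i then m / i else 0) : Nat) : Int) := by
  induction fuel with
  | zero =>
    intro d0 s hf hd0
    rw [psumLoop]
    have hgt : ¬ ((d0:Int) * d0 ≤ (m:Int)) := by
      have : m < d0 := by omega
      nlinarith
    rw [dif_neg hgt]
    have : (Finset.Ico d0 (m + 1)) = ∅ := by
      apply Finset.Ico_eq_empty; omega
    simp [this]
  | succ f ih =>
    intro d0 s hf hd0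
    rw [psumLoop]
    by_cases hle : (d0:Int) * d0 ≤ (m:Int)
    · have hsq : d0 * d0 ≤ m := by exact_mod_cast hle
      have hdm : d0 ≤ m := le_trans (Nat.le_mul_of_pos_left d0 (by omega)) hsq
      rw [dif_pos hle]
      have hmod : (PySem.Int.mod (m:Int) (d0:Int) == 0) = true ↔ d0 ∣ m := by
        rw [beq_iff_eq, PySem.Int.mod_eq_zero_iff_dvd, Int.natCast_dvd_natCast]
      have hq : PySem.Int.floordiv (m:Int) (d0:Int) = ((m / d0 : Nat) : Int) := by
        exact_mod_cast PySem.Int.floordiv_natCast m d0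
      have hIco : Finset.Ico d0 (m+1) = insert d0 (Finset.Ico (d0+1) (m+1)) := by
        rw [Finset.insert_Ico_add_one_left_eq_Ico (by omega)]
      have hnotmem : d0 ∉ (Finset.Ico (d0+1) (m+1)).filter (fun i => i * i ≤ m ∧ i ∣ m) := by
        simp [Finset.mem_filter, Finset.mem_Ico]
      have hc1 : ((d0:Int) + 1) = ((d0 + 1 : Nat) : Int) := by push_cast; ring
      have ihred := fun s' => ih (d0+1) s' (by omega) (by omega)
      rw [hc1]
      by_cases hdvd : d0 ∣ m
      · have hdec : (∑ i ∈ (Finset.Ico d0 (m + 1)).filter (fun i => i * i ≤ m ∧ i ∣ m),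
              (i + if m / i ≠ i then m / i else 0))
            = (d0 + if m / d0 ≠ d0 then m / d0 else 0)
              + (∑ i ∈ (Finset.Ico (d0+1) (m + 1)).filter (fun i => i * i ≤ m ∧ i ∣ m),
                  (i + if m / i ≠ i then m / i else 0)) := by
          rw [hIco, Finset.filter_insert, if_pos ⟨hsq, hdvd⟩, Finset.sum_insert hnotmem]
        rw [if_pos (hmod.2 hdvd)]
        simp only [hq]
        rw [hdec]
        by_cases hne : m / d0 = d0
        · rw [if_neg (by simp [hne] : ¬ (((m/d0 : Nat):Int) ≠ (d0:Int)))]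
          rw [ihred (s + d0), if_neg (not_not.2 hne)]
          push_cast
          ring
        · rw [if_pos (by exact_mod_cast hne : (((m/d0 : Nat):Int) ≠ (d0:Int)))]
          rw [ihred (s + d0 + ((m/d0 : Nat):Int)), if_pos hne]
          push_cast
          ring
      · rw [if_neg (fun hc => hdvd (hmod.1 hc))]
        have hdec : (∑ i ∈ (Finset.Ico d0 (m + 1)).filter (fun i => i * i ≤ m ∧ i ∣ m),
              (i + if m / i ≠ i then m / i else 0))
            = (∑ i ∈ (Finset.Ico (d0+1) (m + 1)).filter (fun i => i * i ≤ m ∧ i ∣ m),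
                  (i + if m / i ≠ i then m / i else 0)) := by
          rw [hIco, Finset.filter_insert, if_neg (fun hc => hdvd hc.2)]
        rw [hdec]
        exact ihred s
    · rw [dif_neg hle]
      have hgt : m < d0 * d0 := by
        by_contra hc
        exact hle (by exact_mod_cast not_lt.1 hc)
      have : (Finset.Ico d0 (m + 1)).filter (fun i => i * i ≤ m ∧ i ∣ m) = ∅ := by
        apply Finset.filter_eq_empty_iff.2
        intro i hi
        simp only [Finset.mem_Ico] at hi
        intro hc
        have : d0 * d0 ≤ i * i := Nat.mul_le_mul hi.1 hi.1
        omega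
      simp [this]

-- the pairing d ↦ m/d matches the divisors above √m with those below; hence 1 plus B's
-- paired contributions is exactly the proper-divisor sum
theorem pairing (m : Nat) (hm : 2 ≤ m) :
    (∑ i ∈ Nat.properDivisors m, i)
      = 1 + ∑ i ∈ (Finset.Ico 2 (m + 1)).filter (fun i => i * i ≤ m ∧ i ∣ m),
              (i + if m / i ≠ i then m / i else 0) := by
  set Small := (Finset.Ico 2 (m + 1)).filter (fun i => i * i ≤ m ∧ i ∣ m) with hS
  set Large := (Finset.Ico 2 (m + 1)).filter (fun e => m < e * e ∧ e ∣ m ∧ e < m) with hL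
  have hm0 : m ≠ 0 := by omega
  have hpart : Nat.properDivisors m = insert 1 (Small ∪ Large) := by
    ext i
    simp only [Nat.mem_properDivisors, Finset.mem_insert, Finset.mem_union, hS, hL,
      Finset.mem_filter, Finset.mem_Ico]
    constructor
    · rintro ⟨hdvd, hlt⟩
      have hi1 : 1 ≤ i := by
        rcases Nat.eq_zero_or_pos i with rfl | h
        · obtain ⟨c, hc⟩ := hdvd; omega
        · exact h
      rcases Nat.lt_or_ge i 2 with h2 | h2
      · left; omega
      · right
        rcases Nat.lt_or_ge m (i * i) with hgt | hle
        · exact Or.inr ⟨⟨h2, by omega⟩, hgt, hdvd, hlt⟩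
        · exact Or.inl ⟨⟨h2, by omega⟩, hle, hdvd⟩
    · rintro (rfl | ⟨⟨h2, hub⟩, hle, hdvd⟩ | ⟨⟨h2, hub⟩, hgt, hdvd, hlt⟩)
      · exact ⟨one_dvd m, by omega⟩
      · refine ⟨hdvd, ?_⟩
        have h2i : 2 * i ≤ i * i := Nat.mul_le_mul_right i h2
        omega
      · exact ⟨hdvd, hlt⟩
  have hnotin : (1:Nat) ∉ Small ∪ Large := by
    simp [hS, hL, Finset.mem_filter, Finset.mem_Ico]
  have hdisj : Disjoint Small Large := by
    rw [Finset.disjoint_left]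
    intro i hiS hiL
    simp only [hS, hL, Finset.mem_filter, Finset.mem_Ico] at hiS hiL
    omega
  have hbij : (∑ i ∈ Small.filter (fun i => m / i ≠ i), m / i) = ∑ e ∈ Large, e := by
    apply Finset.sum_nbij' (i := fun i => m / i) (j := fun e => m / e)
    · intro i hi
      simp only [hS, Finset.mem_filter, Finset.mem_Ico] at hi
      obtain ⟨⟨⟨h2, hub⟩, hsq, hdvd⟩, hne⟩ := hi
      have hmm : i * (m / i) = m := Nat.mul_div_cancel' hdvd
      have hile : i ≤ m / i := by nlinarith [Nat.div_le_self m i]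
      have hilt : i < m / i := lt_of_le_of_ne hile (fun h => hne h.symm)
      simp only [hL, Finset.mem_filter, Finset.mem_Ico]
      refine ⟨⟨by omega, by have := Nat.div_le_self m i; omega⟩, by nlinarith,
        Nat.div_dvd_of_dvd hdvd, by nlinarith⟩
    · intro e he
      simp only [hL, Finset.mem_filter, Finset.mem_Ico] at he
      obtain ⟨⟨h2, hub⟩, hgt, hdvd, hlt⟩ := he
      have hmm : e * (m / e) = m := Nat.mul_div_cancel' hdvd
      have hc2 : 2 ≤ m / e := by
        rcases Nat.lt_or_ge (m / e) 2 with hc | hc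
        · have h01 : m / e = 0 ∨ m / e = 1 := by
            generalize m / e = q at hc ⊢
            omega
          rcases h01 with h | h <;> simp [h] at hmm <;> omega
        · exact hc
      have hclt : m / e < e := by nlinarith
      simp only [hS, Finset.mem_filter, Finset.mem_Ico]
      refine ⟨⟨⟨hc2, by have := Nat.div_le_self m e; omega⟩, by nlinarith,
        Nat.div_dvd_of_dvd hdvd⟩, ?_⟩
      rw [Nat.div_div_self hdvd hm0]
      generalize hq : m / e = q at hclt ⊢
      omega
    · intro i hi
      simp only [hS, Finset.mem_filter, Finset.mem_Ico] at hi
      exact Nat.div_div_self hi.1.2.2 hm0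
    · intro e he
      simp only [hL, Finset.mem_filter, Finset.mem_Ico] at he
      exact Nat.div_div_self he.2.2.1 hm0
    · intro i hi
      rfl
  calc (∑ i ∈ Nat.properDivisors m, i)
      = 1 + (∑ i ∈ Small, i + ∑ e ∈ Large, e) := by
        rw [hpart, Finset.sum_insert hnotin, Finset.sum_union hdisj]
    _ = 1 + (∑ i ∈ Small, i + ∑ i ∈ Small, (if m / i ≠ i then m / i else 0)) := by
        have hfs : (∑ i ∈ Small.filter (fun i => m / i ≠ i), m / i)
            = ∑ i ∈ Small, (if m / i ≠ i then m / i else 0) := Finset.sum_filter _ _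
        rw [← hbij, hfs]
    _ = 1 + ∑ i ∈ Small, (i + if m / i ≠ i then m / i else 0) := by
        rw [← Finset.sum_add_distrib]

theorem psumB_eq (m : Nat) : psumB (m : Int) = ((∑ i ∈ Nat.properDivisors m, i : Nat) : Int) := by
  unfold psumB
  by_cases hm : (m:Int) < 2
  · have : m = 0 ∨ m = 1 := by omega
    rw [if_pos hm]
    rcases this with rfl | rfl <;> simp
  · rw [if_neg hm]
    have hm2 : 2 ≤ m := by omega
    have h2 : ((2:Int)) = ((2:Nat):Int) := by norm_num
    rw [h2, psumLoop_eq m (m+1) 2 1 (by omega) (by omega), pairing m hm2]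
    push_cast
    ring

theorem psumB_eq_dSumA (k : Int) (hk : 0 ≤ k) : psumB k = dSumA k := by
  obtain ⟨m, rfl⟩ := Int.eq_ofNat_of_zero_le hk
  rw [psumB_eq, dSumA_eq]

theorem loop_eq (fuel : Nat) (n : Int) (r : List (Int × Int)) (i : Int) (hi : 0 ≤ i) :
    loopA fuel n r i = loopB fuel n r i := by
  induction fuel generalizing r i with
  | zero => simp [loopA, loopB]
  | succ f ih =>
    rw [loopA, loopB]
    by_cases h : (r.length : Int) < n
    · simp only [if_pos h, dA, psumB_eq_dSumA i hi]
      by_cases hs : dSumA i > i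
      · simp only [if_pos hs]
        exact ih _ _ (by omega)
      · simp only [if_neg hs]
        exact ih _ _ (by omega)
    · simp [if_neg h]

-- ===== VERDICT (by name: the statement is the Claim_ definition above) =====
theorem abundance_spec : Claim_equal_abundance := by
  intro n _
  unfold Spec_abundance abundance abundance_alt
  rw [loop_eq _ _ _ _ le_rfl]
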